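-- pv_equiv track=rewrite | github.com/joetache4/project-euler | 367_BozoSort.py | class_size
-- ===== SOURCE A (Python) =====
-- import math
-- from collections import Counter
--
-- def class_size(length, cycles):
-- 	'''Count the number of permutations in the class given by the cycle list.'''
-- 	total = 1
-- 	for k in cycles:
-- 		total *= math.comb(length, k) * math.factorial(k-1) # choose k items & permute them
-- 		length -= k # chosen k items cannot be chosen again
-- 	# divide by repeated cycles
-- 	# e.g. a [2,2] cycle list double-counts; [3,3,3] overcounts by a factor of 3!
-- 	for cycle,count in Counter(cycles).items():
-- 		total //= math.factorial(count)
-- 	return total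
-- ===== SOURCE B (Python) =====
-- import math
-- from collections import Counter
--
-- def class_size(length, cycles):
--     '''Count the number of permutations in the class given by the cycle list.'''
--     # falling factorial length*(length-1)*...*(length-s+1), then one exact division
--     s = sum(cycles)
--     num = 1
--     for i in range(s):
--         num *= length - i
--     den = 1
--     for k in cycles:
--         den *= k
--     for count in Counter(cycles).values():
--         den *= math.factorial(count)
--     return num // den
-- ===== Notes on version B (the rewrite author's own statement) =====
-- stated objective: alternative
-- what changed: Replaces A's per-cycle comb(length,k)*factorial(k-1) loop with decrementing length and repeated floor divisions by a single falling-factorial product length*(length-1)*...*(length-S+1) divided once by the product of all cycle lengths and the factorials of the repeat counts.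
import Mathlib
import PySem

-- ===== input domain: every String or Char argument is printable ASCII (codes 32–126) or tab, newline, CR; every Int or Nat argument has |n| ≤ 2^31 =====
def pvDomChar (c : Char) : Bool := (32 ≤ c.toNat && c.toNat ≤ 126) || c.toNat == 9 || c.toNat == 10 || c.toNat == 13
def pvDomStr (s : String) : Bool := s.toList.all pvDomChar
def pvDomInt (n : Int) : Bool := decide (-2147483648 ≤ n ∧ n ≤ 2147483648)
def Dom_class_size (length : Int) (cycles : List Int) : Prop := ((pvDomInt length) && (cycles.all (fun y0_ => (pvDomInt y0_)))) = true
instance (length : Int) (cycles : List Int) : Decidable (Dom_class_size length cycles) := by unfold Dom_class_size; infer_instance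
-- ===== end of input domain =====

-- B replaces A's per-cycle comb/factorial loop by one falling-factorial product divided once
-- by the product of the cycle lengths and repeat-count factorials (objective: alternative).

-- ===== PORT A =====
-- math.comb(n, k) for nonnegative arguments (negative arguments raise in Python: excluded by Pre_)
def pyComb (n k : Int) : Int := (n.toNat.choose k.toNat : Int)
-- math.factorial(n) for nonnegative n (negative raises: excluded by Pre_)
def pyFact (n : Int) : Int := (n.toNat.factorial : Int)

def class_size (length : Int) (cycles : List Int) : Int :=
  let st := cycles.foldl (fun (st : Int × Int) k =>
    (st.1 * (pyComb st.2 k * pyFact (k - 1)), st.2 - k)) (1, length)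
  ((PySem.Dict.counter cycles).items).foldl
    (fun t kc => PySem.Int.floordiv t (pyFact kc.2)) st.1

-- ===== PORT B =====
def class_size_alt (length : Int) (cycles : List Int) : Int :=
  let s := cycles.foldl (fun a k => a + k) 0
  let num := (PySem.List.pyRange 0 s 1).foldl (fun n i => n * (length - i)) 1
  let den1 := cycles.foldl (fun d k => d * k) 1
  let den := ((PySem.Dict.counter cycles).items).foldl (fun d kc => d * pyFact kc.2) den1
  PySem.Int.floordiv num den

-- ===== PRECONDITION & SPEC =====
-- Exactly where the Python A returns: every cycle length at least 1 (math.factorial(k-1)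
-- raises ValueError for k ≤ 0) and no PROPER prefix of the cycles overshoots length
-- (math.comb raises ValueError on a negative first argument).
def Pre_class_size (length : Int) (cycles : List Int) : Prop :=
  (∀ k ∈ cycles, 1 ≤ k) ∧ ∀ i < cycles.length, 0 ≤ length - ((cycles.take i).sum)
instance (length : Int) (cycles : List Int) : Decidable (Pre_class_size length cycles) := by
  unfold Pre_class_size; infer_instance

def pvWitness_class_size : Int × List Int := (6, [2, 2, 1])

def Spec_class_size (length : Int) (cycles : List Int) (out : Int) : Prop := out = class_size_alt length cycles
instance (length : Int) (cycles : List Int) (out : Int) : Decidable (Spec_class_size length cycles out) := by unfold Spec_class_size; infer_instance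

-- ===== CLAIM (what is proved, stated in full; the proofs are below) =====
def Claim_equal_class_size : Prop := ∀ (length : Int) (cycles : List Int), Dom_class_size length cycles → Pre_class_size length cycles → Spec_class_size length cycles (class_size length cycles)

-- ===== LEMMAS AND PROOFS =====

-- the product A's first loop accumulates, written as structural recursion
def prodA (L : Int) : List Int → Int
  | [] => 1
  | k :: cs => pyComb L k * pyFact (k - 1) * prodA (L - k) cs

lemma foldA_eq : ∀ (cs : List Int) (t L : Int),
    (cs.foldl (fun (st : Int × Int) k =>
      (st.1 * (pyComb st.2 k * pyFact (k - 1)), st.2 - k)) (t, L)).1 = t * prodA L cs := by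
  intro cs
  induction cs with
  | nil => intro t L; simp [prodA]
  | cons k cs ih =>
      intro t L
      simp only [List.foldl_cons, prodA, ih]
      ring

lemma prodA_nonneg : ∀ (L : Int) (cs : List Int), 0 ≤ prodA L cs := by
  intro L cs
  induction cs generalizing L with
  | nil => simp [prodA]
  | cons k cs ih =>
      have h1 : (0:Int) ≤ pyComb L k := by unfold pyComb; positivity
      have h2 : (0:Int) ≤ pyFact (k - 1) := by unfold pyFact; positivity
      have := ih (L - k)
      simpa [prodA] using mul_nonneg (mul_nonneg h1 h2) this

lemma pyFact_pos (x : Int) : 0 < pyFact x := by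
  unfold pyFact; exact_mod_cast Nat.factorial_pos _

lemma foldMul_eq : ∀ (l : List (Int × Int)) (a : Int),
    l.foldl (fun d kc => d * pyFact kc.2) a = a * (l.map (fun kc => pyFact kc.2)).prod := by
  intro l
  induction l with
  | nil => intro a; simp
  | cons kc l ih =>
      intro a
      simp only [List.foldl_cons, List.map_cons, List.prod_cons, ih]
      ring

lemma foldDiv_eq : ∀ (l : List (Int × Int)) (t : Int), 0 ≤ t →
    l.foldl (fun t kc => PySem.Int.floordiv t (pyFact kc.2)) t
      = PySem.Int.floordiv t ((l.map (fun kc => pyFact kc.2)).prod) := by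
  intro l
  induction l with
  | nil =>
      intro t ht
      simp
  | cons kc l ih =>
      intro t ht
      have hf := pyFact_pos kc.2
      have hP : 0 < (l.map (fun kc => pyFact kc.2)).prod :=
        List.prod_pos (by intro a ha; rcases List.mem_map.1 ha with ⟨x, _, rfl⟩; exact pyFact_pos _)
      have ht' : 0 ≤ PySem.Int.floordiv t (pyFact kc.2) := by
        rw [PySem.Int.floordiv_eq_ediv_of_pos hf]
        exact Int.ediv_nonneg ht (le_of_lt hf)
      simp only [List.foldl_cons, List.map_cons, List.prod_cons]
      rw [ih _ ht', PySem.Int.floordiv_eq_ediv_of_pos hP,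
        PySem.Int.floordiv_eq_ediv_of_pos hf,
        PySem.Int.floordiv_eq_ediv_of_pos (mul_pos hf hP),
        Int.ediv_ediv_of_nonneg (le_of_lt hf)]

-- telescoping of the descending factorial
lemma desc_add : ∀ (b a n : ℕ), a ≤ n →
    n.descFactorial (a + b) = n.descFactorial a * (n - a).descFactorial b := by
  intro b
  induction b with
  | zero => intro a n _; simp
  | succ b ih =>
      intro a n ha
      have h1 : a + (b + 1) = (a + b) + 1 := by omega
      rw [h1, Nat.descFactorial_succ, ih a n ha, Nat.descFactorial_succ]
      have h2 : n - (a + b) = n - a - b := by omega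
      rw [h2]; ring

-- one step of A's loop, times the cycle length, is a block of the falling factorial
lemma step_eq (L k : Int) (hk : 1 ≤ k) :
    pyComb L k * pyFact (k - 1) * k = (L.toNat.descFactorial k.toNat : Int) := by
  obtain ⟨m, hm, rfl⟩ : ∃ m : ℕ, 1 ≤ m ∧ k = (m : Int) :=
    ⟨k.toNat, by omega, (Int.toNat_of_nonneg (by omega)).symm⟩
  have h1 : ((m : Int) - 1).toNat = m - 1 := by omega
  unfold pyComb pyFact
  rw [h1, Int.toNat_natCast]
  have h2 : (m - 1).factorial * m = m.factorial := by
    obtain ⟨m', rfl⟩ : ∃ m', m = m' + 1 := ⟨m - 1, by omega⟩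
    simp [Nat.factorial_succ]; ring
  rw [Nat.descFactorial_eq_factorial_mul_choose]
  push_cast [← h2]
  ring

-- natural-number sum of the cycle lengths
def sumN (cs : List Int) : ℕ := (cs.map Int.toNat).sum

lemma prodA_mul_prod : ∀ (cs : List Int) (L : Int),
    (∀ k ∈ cs, 1 ≤ k) → (∀ i < cs.length, 0 ≤ L - ((cs.take i).sum)) →
    prodA L cs * cs.prod = (L.toNat.descFactorial (sumN cs) : Int) := by
  intro cs
  induction cs with
  | nil => intro L _ _; simp [prodA, sumN]
  | cons k cs ih =>
      intro L hk hpre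
      have hL : 0 ≤ L := by simpa using hpre 0 (by simp)
      have hk1 : 1 ≤ k := hk k (List.mem_cons_self ..)
      have hpre' : ∀ i < cs.length, 0 ≤ (L - k) - ((cs.take i).sum) := by
        intro i hi
        have := hpre (i + 1) (by simpa using Nat.succ_lt_succ hi)
        simp only [List.take_succ_cons, List.sum_cons] at this
        omega
      have hih := ih (L - k) (fun x hx => hk x (List.mem_cons_of_mem _ hx)) hpre'
      have hstep := step_eq L k hk1
      have hsum : sumN (k :: cs) = k.toNat + sumN cs := by simp [sumN]
      calc prodA L (k :: cs) * (k :: cs).prod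
          = (pyComb L k * pyFact (k - 1) * k) * (prodA (L - k) cs * cs.prod) := by
            simp only [prodA, List.prod_cons]; ring
        _ = (L.toNat.descFactorial k.toNat : Int) * ((L - k).toNat.descFactorial (sumN cs) : Int) := by
            rw [hstep, hih]
        _ = (L.toNat.descFactorial (sumN (k :: cs)) : Int) := by
            rw [hsum]
            cases cs with
            | nil => simp [sumN]
            | cons c cs' =>
                have hkL : 0 ≤ L - k := by simpa using hpre 1 (by simp)
                have h1 : (L - k).toNat = L.toNat - k.toNat := by omega
                have h2 : k.toNat ≤ L.toNat := by omega
                rw [h1, desc_add (sumN (c :: cs')) k.toNat L.toNat h2]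
                push_cast; ring

-- B's first loop computes the falling factorial
lemma rangeProd : ∀ (S : ℕ) (L : Int), 0 ≤ L →
    (PySem.List.pyRange 0 (S : Int) 1).foldl (fun n i => n * (L - i)) 1
      = (L.toNat.descFactorial S : Int) := by
  intro S
  induction S with
  | zero => intro L _; simp [PySem.List.pyRange_one_eq_nil]
  | succ S ih =>
      intro L hL
      have hcast : ((S + 1 : ℕ) : Int) = (S : Int) + 1 := by push_cast; ring
      rw [hcast, PySem.List.pyRange_one_succ_right (by positivity), List.foldl_append,
        ih L hL]
      simp only [List.foldl_cons, List.foldl_nil]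
      rw [Nat.descFactorial_succ]
      by_cases h : S ≤ L.toNat
      · have : L - (S : Int) = ((L.toNat - S : ℕ) : Int) := by omega
        rw [this]; push_cast; ring
      · have h0 : L.toNat.descFactorial S = 0 :=
          Nat.descFactorial_of_lt (by omega)
        simp [h0]

lemma foldSum_eq : ∀ (cs : List Int) (a : Int), cs.foldl (fun a k => a + k) a = a + cs.sum := by
  intro cs
  induction cs with
  | nil => intro a; simp
  | cons k cs ih => intro a; simp only [List.foldl_cons, List.sum_cons, ih]; ring

lemma sum_eq_sumN (cs : List Int) (h : ∀ k ∈ cs, 1 ≤ k) : cs.sum = (sumN cs : Int) := by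
  induction cs with
  | nil => simp [sumN]
  | cons k cs ih =>
      have hk : 1 ≤ k := h k (List.mem_cons_self ..)
      have := ih (fun x hx => h x (List.mem_cons_of_mem _ hx))
      simp only [List.sum_cons, this, sumN, List.map_cons, List.sum_cons]
      push_cast
      omega

lemma foldProd_eq : ∀ (cs : List Int), cs.foldl (fun d k => d * k) 1 = cs.prod := by
  intro cs
  rw [List.prod_eq_foldl]

-- ===== VERDICT (by name: the statement is the Claim_ definition above) =====
theorem class_size_spec : Claim_equal_class_size := by
  intro length cycles _ hpre
  obtain ⟨hk, hpref⟩ := hpre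
  unfold Spec_class_size class_size class_size_alt
  simp only []
  rw [foldA_eq, one_mul, foldDiv_eq _ _ (prodA_nonneg length cycles),
    foldSum_eq, foldMul_eq, foldProd_eq,
    sum_eq_sumN cycles hk]
  set P := (((PySem.Dict.counter cycles).items).map (fun kc => pyFact kc.2)).prod with hP
  have hPpos : 0 < P :=
    List.prod_pos (by intro a ha; rcases List.mem_map.1 ha with ⟨x, _, rfl⟩; exact pyFact_pos _)
  cases cycles with
  | nil =>
      simp [prodA, sumN, PySem.List.pyRange_one_eq_nil]
  | cons c cs =>
      have hL : 0 ≤ length := by simpa using hpref 0 (by simp)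
      have hzero : (0 : Int) + (sumN (c :: cs) : Int) = (sumN (c :: cs) : Int) := by ring
      rw [hzero, rangeProd (sumN (c :: cs)) length hL,
        ← prodA_mul_prod (c :: cs) length hk hpref]
      have hKpos : 0 < (c :: cs).prod :=
        List.prod_pos (fun a ha => lt_of_lt_of_le zero_lt_one (hk a ha))
      rw [PySem.Int.floordiv_eq_ediv_of_pos hPpos,
        PySem.Int.floordiv_eq_ediv_of_pos (mul_pos hKpos hPpos),
        mul_comm (prodA length (c :: cs)) ((c :: cs).prod),
        Int.mul_ediv_mul_of_pos _ _ hKpos]
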